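-- pv_equiv track=rewrite | github.com/doasfrancisco/better-mcp | mcps/obsidian/obsidian_client.py | resolve_link
-- ===== SOURCE A (Python) =====
-- _KNOWN_EXTS = (".md", ".pdf", ".png", ".jpg", ".jpeg", ".webp", ".svg", ".gif")
--
-- def resolve_link(target: str, all_files: list[str]) -> str | None:
--     """Resolve a wikilink target to a vault-relative path, or None if ghost.
--
--     Path-style targets (`folder/file`) are matched as exact paths, with .md
--     appended when no recognized extension is present. Bare targets are
--     resolved by basename across all .md files.
--     """
--     target = target.strip()
--     if not target:
--         return None
--
--     if "/" in target:
--         if target in all_files: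
--             return target
--         if not target.lower().endswith(_KNOWN_EXTS):
--             md_path = f"{target}.md"
--             if md_path in all_files:
--                 return md_path
--         return None
--
--     # Bare basename — match any .md whose stem == target
--     for f in all_files:
--         if f.endswith(f"/{target}.md") or f == f"{target}.md":
--             return f
--     # Or any file that matches verbatim (rare)
--     for f in all_files:
--         if f.endswith(f"/{target}") or f == target:
--             return f
--     return None
-- ===== SOURCE B (Python) =====
-- _KNOWN_EXTS = (".md", ".pdf", ".png", ".jpg", ".jpeg", ".webp", ".svg", ".gif")
--
-- def resolve_link(target: str, all_files: list[str]) -> str | None: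
--     """Re-implementation: the bare-basename case scans all_files
--     once, returning immediately on an .md stem match and remembering the
--     first verbatim match for after the loop."""
--     target = target.strip()
--     if not target:
--         return None
--
--     if "/" in target:
--         if target in all_files:
--             return target
--         if not target.lower().endswith(_KNOWN_EXTS):
--             md_path = f"{target}.md"
--             if md_path in all_files:
--                 return md_path
--         return None
--
--     md_suffix = f"/{target}.md"
--     verbatim = None
--     for f in all_files:
--         if f.endswith(md_suffix) or f == f"{target}.md":
--             return f
--         if verbatim is None and (f.endswith(f"/{target}") or f == target):
--             verbatim = f
--     return verbatim
-- ===== Notes on version B (the rewrite author's own statement) =====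
-- stated objective: alternative
-- what changed: The bare-basename case is resolved in a single pass over all_files (early return on an .md stem match, first verbatim match remembered in a candidate variable) instead of A's two sequential full scans.
import Mathlib
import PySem

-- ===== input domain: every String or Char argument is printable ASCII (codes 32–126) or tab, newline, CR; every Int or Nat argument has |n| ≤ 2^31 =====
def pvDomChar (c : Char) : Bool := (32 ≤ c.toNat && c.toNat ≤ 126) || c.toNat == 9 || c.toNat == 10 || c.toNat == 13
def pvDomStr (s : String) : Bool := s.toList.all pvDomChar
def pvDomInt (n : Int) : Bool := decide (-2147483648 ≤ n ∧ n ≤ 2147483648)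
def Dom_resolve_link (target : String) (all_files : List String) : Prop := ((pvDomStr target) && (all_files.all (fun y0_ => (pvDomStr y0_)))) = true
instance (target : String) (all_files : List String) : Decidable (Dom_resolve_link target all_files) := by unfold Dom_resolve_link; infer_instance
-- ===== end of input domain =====

-- B resolves the bare-basename case in a single pass over all_files (candidate variable for
-- the verbatim match) instead of A's two sequential scans; return value proved equal.

-- ===== PORT A =====
def pvKnownExts : List String := [".md", ".pdf", ".png", ".jpg", ".jpeg", ".webp", ".svg", ".gif"]

def resolve_link (target : String) (all_files : List String) : Option String :=
  let target := PySem.Str.strip target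
  if target = "" then none
  else if PySem.Str.isIn "/" target then
    if all_files.contains target then some target
    else if !(pvKnownExts.any (fun e => PySem.Str.endswith (PySem.Str.lower target) e)) then
      let md_path := target ++ ".md"
      if all_files.contains md_path then some md_path else none
    else none
  else
    -- first for-loop: first .md stem match
    match all_files.find? (fun f => PySem.Str.endswith f ("/" ++ target ++ ".md") || f == target ++ ".md") with
    | some f => some f
    | none =>
      -- second for-loop: first verbatim match
      all_files.find? (fun f => PySem.Str.endswith f ("/" ++ target) || f == target)

-- ===== PORT B =====
-- B's single pass: early return on an .md stem match, first verbatim match kept in `verbatim`.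
def pvScan (target : String) : List String → Option String → Option String
  | [], verbatim => verbatim
  | f :: rest, verbatim =>
    if PySem.Str.endswith f ("/" ++ target ++ ".md") || f == target ++ ".md" then some f
    else pvScan target rest
      (if verbatim.isNone && (PySem.Str.endswith f ("/" ++ target) || f == target) then some f
       else verbatim)

def resolve_link_alt (target : String) (all_files : List String) : Option String :=
  let target := PySem.Str.strip target
  if target = "" then none
  else if PySem.Str.isIn "/" target then
    if all_files.contains target then some target
    else if !(pvKnownExts.any (fun e => PySem.Str.endswith (PySem.Str.lower target) e)) then
      let md_path := target ++ ".md"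
      if all_files.contains md_path then some md_path else none
    else none
  else
    pvScan target all_files none

-- ===== PRECONDITION & SPEC =====
def Spec_resolve_link (target : String) (all_files : List String) (out : Option String) : Prop := out = resolve_link_alt target all_files
instance (target : String) (all_files : List String) (out : Option String) : Decidable (Spec_resolve_link target all_files out) := by unfold Spec_resolve_link; infer_instance

-- ===== CLAIM (what is proved, stated in full; the proofs are below) =====
def Claim_equal_resolve_link : Prop := ∀ (target : String) (all_files : List String), Dom_resolve_link target all_files → Spec_resolve_link target all_files (resolve_link target all_files)

-- ===== LEMMAS AND PROOFS =====

-- The single pass with candidate `verbatim` equals: first .md match, else the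
-- already-stored candidate, else the first verbatim match.
theorem pvScan_eq (target : String) (l : List String) (verbatim : Option String) :
    pvScan target l verbatim =
      ((l.find? (fun f => PySem.Str.endswith f ("/" ++ target ++ ".md") || f == target ++ ".md")).or
        (verbatim.or (l.find? (fun f => PySem.Str.endswith f ("/" ++ target) || f == target)))) := by
  induction l generalizing verbatim with
  | nil => cases verbatim <;> rfl
  | cons f rest ih =>
    simp only [pvScan, List.find?]
    by_cases hmd : (PySem.Str.endswith f ("/" ++ target ++ ".md") || f == target ++ ".md") = true
    · rw [if_pos hmd, hmd]; rfl
    · have hmd' : (PySem.Str.endswith f ("/" ++ target ++ ".md") || f == target ++ ".md") = false :=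
        Bool.not_eq_true _ |>.mp hmd
      rw [if_neg hmd, hmd', ih]
      show _ = (List.find? _ rest).or _
      cases verbatim with
      | some c => rfl
      | none =>
        by_cases hv : (PySem.Str.endswith f ("/" ++ target) || f == target) = true
        · rw [hv]; simp only [Option.isNone_none, Bool.true_and]; rfl
        · have hv' := Bool.not_eq_true _ |>.mp hv
          rw [hv']; simp only [Option.isNone_none, Bool.true_and]; rfl

-- ===== VERDICT (by name: the statement is the Claim_ definition above) =====
theorem resolve_link_spec : Claim_equal_resolve_link := by
  intro target all_files _
  unfold Spec_resolve_link resolve_link resolve_link_alt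
  simp only
  split_ifs <;> try rfl
  rw [pvScan_eq]
  cases h : all_files.find? (fun f => PySem.Str.endswith f ("/" ++ PySem.Str.strip target ++ ".md") || f == PySem.Str.strip target ++ ".md") <;>
    simp [Option.or]
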